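-- pv_equiv track=rewrite | github.com/meraf00/Competitive-Programming | contests/contest_8/double_strings.py | double_stings
-- ===== SOURCE A (Python) =====
-- def double_stings(strings):
--     strings_set = set(strings)
--
--     ans = ["0"] * len(strings)
--     for string_index, string in enumerate(strings):
--         for i in range(1, len(string)):
--             prefix = string[:i]
--             suffix = string[i:]
--
--             if prefix in strings_set and suffix in strings_set:
--                 ans[string_index] = '1'
--     return "".join(ans)
-- ===== SOURCE B (Python) =====
-- def double_stings(strings):
--     members = set(strings)
--     # only a (nonempty) prefix of some input string can serve as a first half
--     allpref = {s[:i] for s in strings for i in range(1, len(s))}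
--     firsts = [p for p in members if p and p in allpref]
--     doubles = {p + q for p in firsts for q in members if q}
--     return "".join('1' if s in doubles else '0' for s in strings)
-- ===== Notes on version B (the rewrite author's own statement) =====
-- stated objective: alternative
-- what changed: B is staged: it collects the proper prefixes of the inputs, keeps the members among them as candidate first halves, builds once the set of all concatenations first-half + nonempty member, and then answers each string by a single membership lookup in that set, replacing A's per-string scan over every cut position.
import Mathlib
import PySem

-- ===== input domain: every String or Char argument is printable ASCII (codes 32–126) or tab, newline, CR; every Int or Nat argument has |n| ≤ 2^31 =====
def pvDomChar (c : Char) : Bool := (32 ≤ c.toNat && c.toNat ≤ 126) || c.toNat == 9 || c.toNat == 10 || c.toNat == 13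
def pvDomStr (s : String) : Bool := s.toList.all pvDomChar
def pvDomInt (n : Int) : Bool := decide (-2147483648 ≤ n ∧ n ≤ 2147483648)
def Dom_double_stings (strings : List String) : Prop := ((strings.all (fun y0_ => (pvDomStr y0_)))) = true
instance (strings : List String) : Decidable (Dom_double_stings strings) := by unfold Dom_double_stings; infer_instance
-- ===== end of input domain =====

-- B replaces A's per-cut-position scan with a staged algorithm: collect the proper prefixes of the inputs, build once the set of all concatenations member-prefix + nonempty member, then answer each string by one membership lookup; same results, alternative decomposition.


-- ===== PORT A =====
def double_stings (strings : List String) : String :=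
  let strings_set : PySem.Set String := PySem.Set.ofList strings
  let ans : List String := List.replicate strings.length "0"
  let ans := (PySem.List.enumerate strings).foldl (fun ans si =>
    (PySem.List.pyRange 1 (PySem.Str.len si.2) 1).foldl (fun ans i =>
      let pref := PySem.Str.slice si.2 none (some i)
      let suff := PySem.Str.slice si.2 (some i) none
      if PySem.Set.contains strings_set pref && PySem.Set.contains strings_set suff
      then PySem.List.pySetD ans si.1 "1" else ans) ans) ans
  PySem.Str.join "" ans

-- ===== PORT B =====
-- the set/list comprehensions iterate Python sets in hash order; our list order may differ,
-- but every such intermediate is a Set used only for membership afterwards, so this is exact.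
def allprefOf (strings : List String) : PySem.Set String :=
  PySem.Set.ofList (strings.flatMap (fun s =>
    (PySem.List.pyRange 1 (PySem.Str.len s) 1).map (fun i => PySem.Str.slice s none (some i))))

def doublesOf (strings : List String) : PySem.Set String :=
  let members : PySem.Set String := PySem.Set.ofList strings
  let firsts : List String := members.filter (fun p =>
    decide (p ≠ "") && PySem.Set.contains (allprefOf strings) p)
  PySem.Set.ofList (firsts.flatMap (fun p =>
    (members.filter (fun q => decide (q ≠ ""))).map (fun q => p ++ q)))

def double_stings_alt (strings : List String) : String :=
  let doubles : PySem.Set String := doublesOf strings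
  PySem.Str.join "" (strings.map (fun s => if PySem.Set.contains doubles s then "1" else "0"))

-- ===== PRECONDITION & SPEC =====
def Spec_double_stings (strings : List String) (out : String) : Prop := out = double_stings_alt strings
instance (strings : List String) (out : String) : Decidable (Spec_double_stings strings out) := by unfold Spec_double_stings; infer_instance

-- ===== CLAIM (what is proved, stated in full; the proofs are below) =====
def Claim_equal_double_stings : Prop := ∀ (strings : List String), Dom_double_stings strings → Spec_double_stings strings (double_stings strings)

-- ===== LEMMAS AND PROOFS =====

-- A's per-string test: some cut position yields two member halves
def condA (M : PySem.Set String) (s : String) : Bool :=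
  (PySem.List.pyRange 1 (PySem.Str.len s) 1).any (fun i =>
    PySem.Set.contains M (PySem.Str.slice s none (some i)) &&
    PySem.Set.contains M (PySem.Str.slice s (some i) none))

-- the inner loop of A repeatedly writes "1" at one fixed index: it is a single conditional write
lemma inner_fold (l : List Int) (p : Int → Bool) (k : Int) (hk : 0 ≤ k) :
    ∀ (ans : List String),
      l.foldl (fun ans i => if p i then PySem.List.pySetD ans k "1" else ans) ans
        = if l.any p then PySem.List.pySetD ans k "1" else ans := by
  induction l with
  | nil => intro ans; simp
  | cons i t ih =>
    intro ans
    by_cases h : p i = true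
    · rw [List.foldl_cons]
      simp only [h, if_true, List.any_cons, Bool.true_or]
      rw [ih]
      split_ifs with ht
      · simp [PySem.List.pySetD_of_nonneg _ _ hk, List.set_set]
      · rfl
    · simp [List.foldl_cons, h, ih]

-- the outer loop writes the per-string answers into the replicate-"0" list in order
lemma outer_fold (C : String → Bool) :
    ∀ (l : List String) (pre : List String),
      (PySem.List.enumerate l (pre.length : Int)).foldl
          (fun ans si => if C si.2 then PySem.List.pySetD ans si.1 "1" else ans)
          (pre ++ List.replicate l.length "0")
        = pre ++ l.map (fun s => if C s then "1" else "0") := by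
  intro l
  induction l with
  | nil => intro pre; simp [PySem.List.enumerate]
  | cons s t ih =>
    intro pre
    rw [PySem.List.enumerate_cons, List.foldl_cons]
    simp only [List.length_cons, List.replicate_succ]
    have hset : PySem.List.pySetD (pre ++ "0" :: List.replicate t.length "0") (pre.length : Int) "1"
        = (pre ++ ["1"]) ++ List.replicate t.length "0" := by
      rw [PySem.List.pySetD_natCast, List.set_append]
      simp
    have hlen1 : ((pre ++ ["1"]).length : Int) = (pre.length : Int) + 1 := by simp
    have hlen0 : ((pre ++ ["0"]).length : Int) = (pre.length : Int) + 1 := by simp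
    by_cases h : C s = true
    · simp only [h, if_true]
      rw [hset, ← hlen1, ih (pre ++ ["1"])]
      simp [h]
    · simp only [h, if_false, Bool.false_eq_true]
      have hpre : pre ++ "0" :: List.replicate t.length "0"
          = (pre ++ ["0"]) ++ List.replicate t.length "0" := by simp
      rw [hpre, ← hlen0, ih (pre ++ ["0"])]
      simp [h]

-- A computed as a map over the strings, with condA
lemma A_eq (strings : List String) :
    double_stings strings
      = PySem.Str.join "" (strings.map (fun s => if condA (PySem.Set.ofList strings) s then "1" else "0")) := by
  unfold double_stings
  dsimp only
  congr 1
  have hstep : ∀ (ans : List String) (si : Int × String), si ∈ PySem.List.enumerate strings →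
      (PySem.List.pyRange 1 (PySem.Str.len si.2) 1).foldl (fun ans i =>
        if PySem.Set.contains (PySem.Set.ofList strings) (PySem.Str.slice si.2 none (some i)) &&
           PySem.Set.contains (PySem.Set.ofList strings) (PySem.Str.slice si.2 (some i) none)
        then PySem.List.pySetD ans si.1 "1" else ans) ans
      = if condA (PySem.Set.ofList strings) si.2 then PySem.List.pySetD ans si.1 "1" else ans := by
    intro ans si hsi
    have hk : 0 ≤ si.1 := by
      rw [PySem.List.mem_enumerate_iff] at hsi
      obtain ⟨k, hkl, rfl⟩ := hsi
      simp
    exact inner_fold _ _ _ hk ans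
  refine (PySem.List.foldl_congr_mem (PySem.List.enumerate strings) _
      (fun ans si => if condA (PySem.Set.ofList strings) si.2
            then PySem.List.pySetD ans si.1 "1" else ans) _ hstep).trans ?_
  have h0 : List.replicate strings.length "0" = ([] : List String) ++ List.replicate strings.length "0" := by simp
  rw [h0]
  have := outer_fold (fun s => condA (PySem.Set.ofList strings) s) strings []
  simpa using this

-- nonemptiness of a string through its character list
lemma ne_empty_iff_toList (s : String) : s ≠ "" ↔ s.toList ≠ [] := by
  constructor
  · intro h he
    exact h (String.toList_injective (by simpa using he))
  · intro h he
    apply h; rw [he]; rfl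

-- membership in the product set characterised
lemma mem_doubles (strings : List String) (s : String) :
    PySem.Set.contains (doublesOf strings) s = true
      ↔ ∃ p ∈ PySem.Set.ofList strings, p ≠ "" ∧
          PySem.Set.contains (allprefOf strings) p = true ∧
          ∃ q ∈ PySem.Set.ofList strings, q ≠ "" ∧ p ++ q = s := by
  unfold doublesOf
  rw [PySem.Set.contains_iff, PySem.Set.mem_ofList, List.mem_flatMap]
  constructor
  · rintro ⟨p, hpf, hs⟩
    rw [List.mem_filter, Bool.and_eq_true, decide_eq_true_eq] at hpf
    rw [List.mem_map] at hs
    obtain ⟨q, hqf, rfl⟩ := hs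
    rw [List.mem_filter, decide_eq_true_eq] at hqf
    exact ⟨p, hpf.1, hpf.2.1, hpf.2.2, q, hqf.1, hqf.2, rfl⟩
  · rintro ⟨p, hp, hpe, hpa, q, hq, hqe, rfl⟩
    refine ⟨p, List.mem_filter.mpr ⟨hp, by rw [Bool.and_eq_true, decide_eq_true_eq]; exact ⟨hpe, hpa⟩⟩, ?_⟩
    rw [List.mem_map]
    exact ⟨q, List.mem_filter.mpr ⟨hq, by simp [hqe]⟩, rfl⟩

-- A's cut-position scan accepts exactly the members of the product set
lemma cond_eq (strings : List String) (s : String) (hs0 : s ∈ strings) :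
    condA (PySem.Set.ofList strings) s
      = PySem.Set.contains (doublesOf strings) s := by
  rw [Bool.eq_iff_iff, mem_doubles]
  unfold condA
  rw [List.any_eq_true]
  constructor
  · rintro ⟨i, hi, hc⟩
    have hiR := hi
    rw [PySem.List.mem_pyRange_one] at hi
    obtain ⟨h1, h2⟩ := hi
    rw [PySem.Str.len_eq] at h2
    rw [Bool.and_eq_true] at hc
    obtain ⟨hpre, hsuf⟩ := hc
    have htl : (PySem.Str.slice s none (some i)).toList = s.toList.take i.toNat := by
      rw [PySem.Str.toList_slice]; exact PySem.List.slice_to _ (by omega)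
    have htl' : (PySem.Str.slice s (some i) none).toList = s.toList.drop i.toNat := by
      rw [PySem.Str.toList_slice]; exact PySem.List.slice_from _ (by omega)
    have hiN : i.toNat < s.toList.length := by omega
    have hi1 : 1 ≤ i.toNat := by omega
    refine ⟨PySem.Str.slice s none (some i), (PySem.Set.contains_iff _ _).mp hpre, ?_, ?_,
      PySem.Str.slice s (some i) none, (PySem.Set.contains_iff _ _).mp hsuf, ?_, ?_⟩
    · rw [ne_empty_iff_toList, htl]
      intro he
      have := congrArg List.length he
      rw [List.length_take, List.length_nil] at this
      omega
    · rw [PySem.Set.contains_iff]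
      unfold allprefOf
      rw [PySem.Set.mem_ofList, List.mem_flatMap]
      exact ⟨s, hs0, List.mem_map.mpr ⟨i, hiR, rfl⟩⟩
    · rw [ne_empty_iff_toList, htl']
      intro he
      have := congrArg List.length he
      rw [List.length_drop, List.length_nil] at this
      omega
    · apply String.toList_injective
      simp [htl, htl']
  · rintro ⟨p, hp, hpe, hpa, q, hq, hqe, rfl⟩
    have hpl : p.toList ≠ [] := (ne_empty_iff_toList p).mp hpe
    have hql : q.toList ≠ [] := (ne_empty_iff_toList q).mp hqe
    have hcat : (p ++ q).toList = p.toList ++ q.toList := by simp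
    have hppos : 0 < p.toList.length := List.length_pos_iff.mpr hpl
    have hqpos : 0 < q.toList.length := List.length_pos_iff.mpr hql
    refine ⟨(p.toList.length : Int), ?_, ?_⟩
    · rw [PySem.List.mem_pyRange_one, PySem.Str.len_eq, hcat, List.length_append]
      refine ⟨by exact_mod_cast hppos, by push_cast; omega⟩
    · have htl : (PySem.Str.slice (p ++ q) none (some (p.toList.length : Int))).toList = p.toList := by
        rw [PySem.Str.toList_slice, hcat]
        have h := PySem.List.slice_to (xs := p.toList ++ q.toList)
          (b := (p.toList.length : Int)) (Int.natCast_nonneg _)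
        exact h.trans (by simp)
      have htl' : (PySem.Str.slice (p ++ q) (some (p.toList.length : Int)) none).toList = q.toList := by
        rw [PySem.Str.toList_slice, hcat]
        have h := PySem.List.slice_from (xs := p.toList ++ q.toList)
          (a := (p.toList.length : Int)) (Int.natCast_nonneg _)
        exact h.trans (by simp)
      have hps : PySem.Str.slice (p ++ q) none (some (p.toList.length : Int)) = p :=
        String.toList_injective htl
      have hqs : PySem.Str.slice (p ++ q) (some (p.toList.length : Int)) none = q :=
        String.toList_injective htl'
      rw [Bool.and_eq_true, hps, hqs]
      exact ⟨(PySem.Set.contains_iff _ _).mpr hp, (PySem.Set.contains_iff _ _).mpr hq⟩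

-- ===== VERDICT (by name: the statement is the Claim_ definition above) =====
theorem double_stings_spec : Claim_equal_double_stings := by
  unfold Claim_equal_double_stings Spec_double_stings
  intro strings _
  rw [A_eq]
  unfold double_stings_alt
  dsimp only
  congr 1
  exact List.map_congr_left (fun s hs => by rw [cond_eq strings s hs])
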